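-- pv_equiv track=rewrite | github.com/tishchennko/EGE | 23-задание ЕГЭ/task-23.13968.py | f
-- ===== SOURCE A (Python) =====
-- def f(x, end):
--     if x > end:
--         return 0
--     if x == end:
--         return 1
--     if x == 21:
--         return 0
--     return f(x + 2, end) + f(x + 3, end) + f(x * 2, end)
-- ===== SOURCE B (Python) =====
-- def _look(cnt, x, end, nxt):
--     return cnt[nxt - x] if x <= nxt <= end else 0
--
--
-- def f(x, end):
--     if x > end:
--         return 0
--     if x == end:
--         return 1
--     cnt = [0] * (end - x + 1)
--     cnt[end - x] = 1
--     for v in range(end - 1, x - 1, -1):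
--         if v != 21:
--             cnt[v - x] = (_look(cnt, x, end, v + 2)
--                           + _look(cnt, x, end, v + 3)
--                           + _look(cnt, x, end, v * 2))
--     return cnt[0]
-- ===== Notes on version B (the rewrite author's own statement) =====
-- stated objective: alternative
-- what changed: Replaced the triple-branch recursion by a bottom-up dynamic-programming table filled from end down to x, so each state is computed once instead of being recomputed along every path.
import Mathlib
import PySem

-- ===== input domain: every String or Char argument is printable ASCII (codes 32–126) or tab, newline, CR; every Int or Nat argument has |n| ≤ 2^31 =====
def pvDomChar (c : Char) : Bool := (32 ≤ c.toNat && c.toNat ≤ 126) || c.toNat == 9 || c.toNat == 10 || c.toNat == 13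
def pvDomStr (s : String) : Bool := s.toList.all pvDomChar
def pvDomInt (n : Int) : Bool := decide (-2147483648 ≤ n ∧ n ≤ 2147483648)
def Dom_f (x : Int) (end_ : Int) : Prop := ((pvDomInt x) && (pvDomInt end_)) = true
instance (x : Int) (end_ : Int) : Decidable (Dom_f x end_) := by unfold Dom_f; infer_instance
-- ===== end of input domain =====

-- B computes the same path count with a bottom-up DP table over [x, end] instead of A's
-- triple-branch recursion; equivalence is claimed on Pre_f (A recurses forever when x ≤ 0 < end).

-- ===== PORT A =====
-- literal port of A; the 'x ≤ 0' branch is only a totality guard: there Python A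
-- recurses forever through x*2 (RecursionError), and those inputs are outside Pre_f.
def f (x : Int) (end_ : Int) : Int :=
  if x > end_ then 0
  else if x = end_ then 1
  else if x = 21 then 0
  else if x ≤ 0 then 0
  else f (x + 2) end_ + f (x + 3) end_ + f (x * 2) end_
termination_by (end_ - x).toNat
decreasing_by all_goals omega

-- ===== PORT B =====
-- port of _look; the guarded cnt[nxt - x] is exact: the guard ensures the index is in range
def look (cnt : List Int) (x : Int) (end_ : Int) (nxt : Int) : Int :=
  if x ≤ nxt ∧ nxt ≤ end_ then cnt.getD (nxt - x).toNat 0 else 0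

def f_alt (x : Int) (end_ : Int) : Int :=
  if x > end_ then 0
  else if x = end_ then 1
  else
    let cnt0 : List Int := (List.replicate (end_ - x + 1).toNat 0).set (end_ - x).toNat 1
    let cnt :=
      (PySem.List.pyRange (end_ - 1) (x - 1) (-1)).foldl
        (fun cnt v =>
          if v ≠ 21 then
            cnt.set (v - x).toNat
              (look cnt x end_ (v + 2) + look cnt x end_ (v + 3) + look cnt x end_ (v * 2))
          else cnt)
        cnt0
    cnt.getD 0 0

-- ===== PRECONDITION & SPEC =====
-- Pre_f excludes the inputs where Python A never returns a value: for x ≤ 0 with x < end the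
-- x*2 branch recurses forever, so A raises RecursionError there.
def Pre_f (x : Int) (end_ : Int) : Prop := 1 ≤ x ∨ end_ ≤ x
instance (x : Int) (end_ : Int) : Decidable (Pre_f x end_) := by unfold Pre_f; infer_instance
def pvWitness_f : Int × Int := (1, 12)

def Spec_f (x : Int) (end_ : Int) (out : Int) : Prop := out = f_alt x end_
instance (x : Int) (end_ : Int) (out : Int) : Decidable (Spec_f x end_ out) := by unfold Spec_f; infer_instance

-- ===== CLAIM (what is proved, stated in full; the proofs are below) =====
def Claim_equal_f : Prop := ∀ (x : Int) (end_ : Int), Dom_f x end_ → Pre_f x end_ → Spec_f x end_ (f x end_)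

-- ===== LEMMAS AND PROOFS =====

lemma getD_set_self (l : List Int) (i : Nat) (a : Int) (h : i < l.length) :
    (l.set i a).getD i 0 = a := by
  simp [List.getD_eq_getElem?_getD, h]

lemma getD_set_ne (l : List Int) (i j : Nat) (a : Int) (h : i ≠ j) :
    (l.set i a).getD j 0 = l.getD j 0 := by
  simp [List.getD_eq_getElem?_getD, h]

-- one recursive step of f, in the form the DP table uses
lemma f_step (v : Int) (end_ : Int) (h1 : 1 ≤ v) (h2 : v < end_) (h3 : v ≠ 21) :
    f v end_ = f (v + 2) end_ + f (v + 3) end_ + f (v * 2) end_ := by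
  rw [f]
  simp only [if_neg (by omega : ¬ v > end_), if_neg (by omega : ¬ v = end_),
    if_neg h3, if_neg (by omega : ¬ v ≤ 0)]

lemma f_of_gt (v : Int) (end_ : Int) (h : end_ < v) : f v end_ = 0 := by
  rw [f]; simp [show v > end_ by omega]

lemma f_of_eq (end_ : Int) : f end_ end_ = 1 := by
  rw [f]; simp

lemma f_of_21 (end_ : Int) (h : (21 : Int) ≠ end_) (h2 : ¬ (21 : Int) > end_) :
    f 21 end_ = 0 := by
  rw [f]; simp [h, h2]

-- loop invariant: folding the countdown range from w down to x turns a table that is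
-- correct above w (and zero at and below w) into a table correct on all of [x, end_]
lemma loop_inv (x end_ : Int) (hx : 1 ≤ x) (hlt : x < end_) :
    ∀ (w : Int) (cnt : List Int),
      x - 1 ≤ w → w ≤ end_ - 1 →
      cnt.length = (end_ - x + 1).toNat →
      (∀ u : Int, w < u → u ≤ end_ → cnt.getD (u - x).toNat 0 = f u end_) →
      (∀ u : Int, x ≤ u → u ≤ w → cnt.getD (u - x).toNat 0 = 0) →
      ∀ u : Int, x ≤ u → u ≤ end_ →
        ((PySem.List.pyRange w (x - 1) (-1)).foldl
          (fun cnt v =>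
            if v ≠ 21 then
              cnt.set (v - x).toNat
                (look cnt x end_ (v + 2) + look cnt x end_ (v + 3) + look cnt x end_ (v * 2))
            else cnt)
          cnt).getD (u - x).toNat 0 = f u end_ := by
  intro w
  induction hn : (w - (x - 1)).toNat using Nat.strong_induction_on generalizing w with
  | _ n ih =>
  intro cnt hw1 hw2 hlen habove hzero u hu1 hu2
  rcases (by omega : w ≤ x - 1 ∨ x - 1 < w) with hbase | hstep
  · rw [PySem.List.pyRange_neg_one_eq_nil hbase]
    exact habove u (by omega) hu2
  · rw [PySem.List.pyRange_neg_one_cons (by omega : x - 1 < w)]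
    simp only [List.foldl_cons]
    -- the new table after processing v = w
    set cnt' := (if w ≠ 21 then
        cnt.set (w - x).toNat
          (look cnt x end_ (w + 2) + look cnt x end_ (w + 3) + look cnt x end_ (w * 2))
      else cnt) with hcnt'
    have hlen' : cnt'.length = (end_ - x + 1).toNat := by
      rw [hcnt']; split <;> simp [hlen]
    have hlook : ∀ nxt : Int, w < nxt → look cnt x end_ nxt = f nxt end_ := by
      intro nxt hn
      unfold look
      split
      · next hg => exact habove nxt hn hg.2
      · next hg => exact (f_of_gt nxt end_ (by omega)).symm
    have habove' : ∀ u : Int, w - 1 < u → u ≤ end_ → cnt'.getD (u - x).toNat 0 = f u end_ := by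
      intro u hu1 hu2
      rcases eq_or_lt_of_le (show w ≤ u by omega) with rfl | hgt
      · -- u = w : the entry just written (or, for 21, the zero it already held)
        rw [hcnt']
        by_cases h21 : w = 21
        · subst h21
          simp only [ne_eq, not_true_eq_false, if_false]
          rw [hzero 21 (by omega) le_rfl, f_of_21 end_ (by omega) (by omega)]
        · simp only [ne_eq, h21, not_false_eq_true, if_true]
          rw [getD_set_self _ _ _ (by omega)]
          rw [hlook (w + 2) (by omega), hlook (w + 3) (by omega),
              hlook (w * 2) (by omega : w < w * 2)]
          exact (f_step w end_ (by omega) (by omega) h21).symm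
      · -- u > w : untouched entry
        have : cnt'.getD (u - x).toNat 0 = cnt.getD (u - x).toNat 0 := by
          rw [hcnt']; split
          · exact getD_set_ne _ _ _ _ (by omega)
          · rfl
        rw [this]; exact habove u hgt hu2
    have hzero' : ∀ u : Int, x ≤ u → u ≤ w - 1 → cnt'.getD (u - x).toNat 0 = 0 := by
      intro u hu1 hu2
      have : cnt'.getD (u - x).toNat 0 = cnt.getD (u - x).toNat 0 := by
        rw [hcnt']; split
        · exact getD_set_ne _ _ _ _ (by omega)
        · rfl
      rw [this]; exact hzero u hu1 (by omega)
    exact ih ((w - 1) - (x - 1)).toNat (by omega) (w - 1) rfl cnt' (by omega) (by omega)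
      hlen' habove' hzero' u hu1 hu2

lemma getD_replicate_set (n i j : Nat) (a : Int) (h : i ≠ j) :
    ((List.replicate n (0 : Int)).set i a).getD j 0 = 0 := by
  rw [getD_set_ne _ _ _ _ h]
  rcases (by omega : j < n ∨ n ≤ j) with hj | hj
  · simp [List.getD_eq_getElem?_getD, hj]
  · rw [List.getD_eq_getElem?_getD,
      List.getElem?_eq_none (le_trans (List.length_replicate ▸ le_rfl) hj)]
    rfl

-- ===== VERDICT (by name: the statement is the Claim_ definition above) =====
theorem f_spec : Claim_equal_f := by
  intro x end_ _hdom hpre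
  unfold Spec_f f_alt
  rcases lt_trichotomy x end_ with hlt | heq | hgt
  · -- x < end_ : Pre_f forces 1 ≤ x; run the loop invariant
    have hx : 1 ≤ x := by rcases hpre with h | h <;> omega
    rw [if_neg (by omega : ¬ x > end_), if_neg (by omega : ¬ x = end_)]
    have hmain := loop_inv x end_ hx hlt (end_ - 1)
      ((List.replicate (end_ - x + 1).toNat 0).set (end_ - x).toNat 1)
      (by omega) (by omega) (by simp)
      (by
        intro u hu1 hu2
        have hu : u = end_ := by omega
        subst hu
        rw [getD_set_self _ _ _ (by simp; omega), f_of_eq])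
      (by
        intro u hu1 hu2
        exact getD_replicate_set _ _ _ _ (by omega))
      x le_rfl (by omega)
    simpa using hmain.symm
  · subst heq
    rw [f_of_eq]; simp
  · rw [f_of_gt _ _ hgt]
    rw [if_pos (by omega : x > end_)]
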